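-- pv_equiv track=rewrite | github.com/SimonTeshuva/interpretable_Rule_Ensemble | orb/branchbound.py | rule_extensions
-- ===== SOURCE A (Python) =====
-- def rule_extensions(rule, propositions_dict):
--     extensions = []
--
--     if not rule:
--         for prop_type in propositions_dict:
--             propositions = propositions_dict[prop_type]
--             for proposition in propositions:
--                 extensions.append((proposition, prop_type))
--     else:
--         valid_extension_types = []
--         for prop_type in propositions_dict:
--             if prop_type not in rule[1]:
--                 valid_extension_types.append(prop_type)
--
--         for prop_type in propositions_dict:
--             if prop_type in valid_extension_types:
--                 propositions = propositions_dict[prop_type]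
--                 for proposition in propositions:
--                     extensions.append((proposition, prop_type))
--
--
--     return extensions
-- ===== SOURCE B (Python) =====
-- def rule_extensions(rule, propositions_dict):
--     used = rule[1] if rule else ()
--     return [(p, t)
--             for t, props in propositions_dict.items() if t not in used
--             for p in props]
-- ===== Notes on version B (the rewrite author's own statement) =====
-- stated objective: simpler
-- what changed: Replaced A's two-branch structure (separate no-rule loop, plus a valid_extension_types list built in one pass over the keys and rescanned by membership in a second pass that re-indexes the dict) with a single comprehension over the dict's items filtered by membership in the rule's used types; this removes the k^2 key membership rescans and the repeated dict indexing.
import Mathlib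
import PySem

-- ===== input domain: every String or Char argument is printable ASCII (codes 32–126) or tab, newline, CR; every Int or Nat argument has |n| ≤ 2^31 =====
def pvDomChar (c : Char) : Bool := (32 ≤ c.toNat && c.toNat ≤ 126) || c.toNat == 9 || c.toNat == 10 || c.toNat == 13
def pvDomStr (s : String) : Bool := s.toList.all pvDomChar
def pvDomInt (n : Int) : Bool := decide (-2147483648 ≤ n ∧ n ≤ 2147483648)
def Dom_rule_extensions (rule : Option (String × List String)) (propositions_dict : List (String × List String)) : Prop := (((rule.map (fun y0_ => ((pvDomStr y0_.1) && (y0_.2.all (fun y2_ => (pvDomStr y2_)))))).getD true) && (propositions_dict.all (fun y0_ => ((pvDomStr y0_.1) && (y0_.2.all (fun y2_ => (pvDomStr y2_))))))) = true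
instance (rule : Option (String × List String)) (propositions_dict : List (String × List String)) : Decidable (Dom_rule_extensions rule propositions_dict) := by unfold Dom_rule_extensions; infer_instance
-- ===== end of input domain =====

-- B replaces A's two-branch, index-then-rescan structure with a single filtered comprehension
-- over the dict's items (objective: simpler).

-- ===== PORT A =====
def rule_extensions (rule : Option (String × List String)) (propositions_dict : List (String × List String)) : List (String × String) :=
  match rule with
  | none =>
    -- for prop_type in propositions_dict: for proposition in propositions_dict[prop_type]: append
    (propositions_dict.map Prod.fst).foldl (fun ext t =>
      ((PySem.Dict.get? ⟨propositions_dict⟩ t).getD []).foldl (fun e p => e ++ [(p, t)]) ext) []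
  | some r =>
    let valid_extension_types :=
      (propositions_dict.map Prod.fst).foldl (fun acc t => if t ∈ r.2 then acc else acc ++ [t]) []
    (propositions_dict.map Prod.fst).foldl (fun ext t =>
      if t ∈ valid_extension_types then
        ((PySem.Dict.get? ⟨propositions_dict⟩ t).getD []).foldl (fun e p => e ++ [(p, t)]) ext
      else ext) []

-- ===== PORT B =====
def rule_extensions_alt (rule : Option (String × List String)) (propositions_dict : List (String × List String)) : List (String × String) :=
  let used : List String := match rule with | some r => r.2 | none => []
  propositions_dict.flatMap (fun tp => if tp.1 ∈ used then [] else tp.2.map (fun p => (p, tp.1)))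

-- ===== PRECONDITION & SPEC =====
-- The association list stands for a Python dict, which never has duplicate keys; on duplicate-key
-- lists A's first-match re-indexing and B's direct use of each pair's value are both accidental.
def Pre_rule_extensions (rule : Option (String × List String)) (propositions_dict : List (String × List String)) : Prop :=
  (propositions_dict.map Prod.fst).Nodup
instance (rule : Option (String × List String)) (propositions_dict : List (String × List String)) : Decidable (Pre_rule_extensions rule propositions_dict) := by unfold Pre_rule_extensions; infer_instance
def pvWitness_rule_extensions : (Option (String × List String)) × (List (String × List String)) :=
  (some ("x", ["a"]), [("a", ["p", "q"]), ("b", ["r"])])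

def Spec_rule_extensions (rule : Option (String × List String)) (propositions_dict : List (String × List String)) (out : List (String × String)) : Prop := out = rule_extensions_alt rule propositions_dict
instance (rule : Option (String × List String)) (propositions_dict : List (String × List String)) (out : List (String × String)) : Decidable (Spec_rule_extensions rule propositions_dict out) := by unfold Spec_rule_extensions; infer_instance

-- ===== CLAIM (what is proved, stated in full; the proofs are below) =====
def Claim_equal_rule_extensions : Prop := ∀ (rule : Option (String × List String)) (propositions_dict : List (String × List String)), Dom_rule_extensions rule propositions_dict → Pre_rule_extensions rule propositions_dict → Spec_rule_extensions rule propositions_dict (rule_extensions rule propositions_dict)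

-- ===== LEMMAS AND PROOFS =====

-- A's key loop with a first-match lookup equals B's items loop, for keys without duplicates.
theorem foldl_keys_lookup_eq_flatMap (P : String → Prop) [DecidablePred P]
    (pd : List (String × List String)) (h : (pd.map Prod.fst).Nodup)
    (ext : List (String × String)) :
    (pd.map Prod.fst).foldl (fun e t =>
        if P t then e ++ ((PySem.Dict.get? ⟨pd⟩ t).getD []).map (fun p => (p, t)) else e) ext
      = ext ++ pd.flatMap (fun tp => if P tp.1 then tp.2.map (fun p => (p, tp.1)) else []) := by
  induction pd generalizing ext with
  | nil => simp
  | cons kv rest ih =>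
    obtain ⟨k, v⟩ := kv
    simp only [List.map_cons, List.foldl_cons, List.flatMap_cons]
    simp only [List.map_cons, List.nodup_cons] at h
    have hk : k ∉ rest.map Prod.fst := h.1
    have hrest : (rest.map Prod.fst).Nodup := h.2
    have hget : PySem.Dict.get? ⟨(k, v) :: rest⟩ k = some v := by
      simp [PySem.Dict.get?]
    rw [PySem.List.foldl_congr_mem _ _
      (fun e t => if P t then e ++ ((PySem.Dict.get? ⟨rest⟩ t).getD []).map (fun p => (p, t)) else e) _
      (by
        intro acc t ht
        have hne : (k == t) = false := by
          simp only [beq_eq_false_iff_ne]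
          intro hkt; exact hk (hkt ▸ ht)
        simp [PySem.Dict.get?, hne])]
    rw [ih hrest]
    by_cases hP : P k
    · simp [hP, hget]
    · simp [hP]

-- A builds valid_extension_types by conditional append; it is the filtered key list.
theorem vet_eq_filter (r2 : List String) (keys : List String) :
    keys.foldl (fun acc t => if t ∈ r2 then acc else acc ++ [t]) []
      = keys.filter (fun t => decide (¬ t ∈ r2)) := by
  rw [PySem.List.foldl_congr_mem _ _ (fun acc t => if ¬ t ∈ r2 then acc ++ [t] else acc) _
    (by intro acc t _; by_cases h : t ∈ r2 <;> simp [h])]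
  rw [PySem.List.foldl_append_ite_eq_filter (fun t => ¬ t ∈ r2)]
  simp

-- ===== VERDICT (by name: the statement is the Claim_ definition above) =====
theorem rule_extensions_spec : Claim_equal_rule_extensions := by
  intro rule pd _ hpre
  unfold Spec_rule_extensions rule_extensions rule_extensions_alt
  match rule with
  | none =>
    simp only
    rw [PySem.List.foldl_congr_mem _ _
      (fun e t => if (True : Prop) then e ++ ((PySem.Dict.get? ⟨pd⟩ t).getD []).map (fun p => (p, t)) else e) _
      (by
        intro acc t _
        rw [PySem.List.foldl_append_singleton_eq_map (fun p => (p, t))]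
        simp)]
    rw [foldl_keys_lookup_eq_flatMap (fun _ => True) pd hpre]
    simp
  | some r =>
    simp only
    rw [vet_eq_filter r.2 (pd.map Prod.fst)]
    rw [PySem.List.foldl_congr_mem _ _
      (fun e t => if ¬ t ∈ r.2 then e ++ ((PySem.Dict.get? ⟨pd⟩ t).getD []).map (fun p => (p, t)) else e) _
      (by
        intro acc t ht
        have hmem : (t ∈ (pd.map Prod.fst).filter (fun x => decide (¬ x ∈ r.2))) ↔ ¬ t ∈ r.2 := by
          simp [List.mem_filter, ht]
        by_cases hu : t ∈ r.2
        · simp [hmem, hu]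
        · rw [PySem.List.foldl_append_singleton_eq_map (fun p => (p, t))]
          simp only [hmem])]
    rw [foldl_keys_lookup_eq_flatMap (fun t => ¬ t ∈ r.2) pd hpre]
    simp only [List.nil_append]
    congr 1
    funext tp
    by_cases hu : tp.1 ∈ r.2 <;> simp [hu]
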